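-- pv_equiv track=rewrite | github.com/djwooten/synergy | development/replace_exponents/replace_exponents.py | get_succeeding_factor
-- ===== SOURCE A (Python) =====
-- def get_succeeding_factor(s, idx, open_to_close):
--     # return end_idx, substr
--     if s[idx+2]=="(":
--         end_idx = open_to_close[idx+2]
--         return end_idx+1, s[idx+2:end_idx+1]
--     else:
--         # Need to find the closest succeeding +,-,*,/
--         next_operator = len(s)
--         for operator in ["+", "-", "*", "/"]:
--             op_idx = s.find(operator, idx+2)
--             if op_idx<0: continue
--             if op_idx < next_operator:
--                 next_operator = op_idx
--         end_idx = next_operator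
--         return end_idx, s[idx+2:end_idx]
-- ===== SOURCE B (Python) =====
-- def get_succeeding_factor(s, idx, open_to_close):
--     # return end_idx, substr
--     if s[idx + 2] == "(":
--         end_idx = open_to_close[idx + 2]
--         return end_idx + 1, s[idx + 2:end_idx + 1]
--     # one forward pass over the rest of the string, stopping at the first operator
--     tail = s[idx + 2:]
--     offset = len(tail)
--     for k, ch in enumerate(tail):
--         if ch in "+-*/":
--             offset = k
--             break
--     end_idx = len(s) - len(tail) + offset
--     return end_idx, tail[:offset]
-- ===== Notes on version B (the rewrite author's own statement) =====
-- stated objective: alternative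
-- what changed: The else branch's four repeated s.find scans (one per operator) are replaced by a single forward pass over the tail s[idx+2:] that stops at the first character in +-*/; the '(' branch is unchanged.
import Mathlib
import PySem

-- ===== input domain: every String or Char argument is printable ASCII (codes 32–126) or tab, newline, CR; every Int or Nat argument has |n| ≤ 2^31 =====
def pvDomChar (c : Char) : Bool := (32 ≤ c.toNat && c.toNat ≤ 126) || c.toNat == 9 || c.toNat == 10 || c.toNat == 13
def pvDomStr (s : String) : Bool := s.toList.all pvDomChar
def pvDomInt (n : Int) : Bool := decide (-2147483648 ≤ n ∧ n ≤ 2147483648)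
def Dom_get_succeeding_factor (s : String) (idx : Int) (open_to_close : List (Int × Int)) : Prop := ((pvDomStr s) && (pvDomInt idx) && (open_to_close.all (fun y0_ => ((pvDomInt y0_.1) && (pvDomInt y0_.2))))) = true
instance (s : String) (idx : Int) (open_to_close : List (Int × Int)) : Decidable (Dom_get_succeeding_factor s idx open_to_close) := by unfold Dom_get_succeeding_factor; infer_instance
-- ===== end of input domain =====

-- B replaces A's four repeated s.find scans by one forward pass over the tail s[idx+2:]
-- that stops at the first +, -, * or / (objective: alternative single-pass decomposition).

-- ===== PORT A =====
def get_succeeding_factor (s : String) (idx : Int) (open_to_close : List (Int × Int)) : Int × String :=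
  match PySem.Str.pyGet? s (idx + 2) with
  | none => (0, "")  -- Python raises IndexError here; excluded by Pre_
  | some c =>
    if c = '(' then
      match PySem.Dict.get? (PySem.Dict.mk open_to_close) (idx + 2) with
      | none => (0, "")  -- Python raises KeyError here; excluded by Pre_
      | some end_idx => (end_idx + 1, PySem.Str.slice s (some (idx + 2)) (some (end_idx + 1)))
    else
      let next_operator := ["+", "-", "*", "/"].foldl (fun next_operator op =>
        let op_idx := PySem.Str.findFrom s op (idx + 2) none
        if op_idx < 0 then next_operator
        else if op_idx < next_operator then op_idx else next_operator) (PySem.Str.len s)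
      (next_operator, PySem.Str.slice s (some (idx + 2)) (some next_operator))

-- ===== PORT B =====
-- the forward pass of Source B over the tail: index of the first char in + - * /, or the
-- tail's length if none occurs (Source B initialises offset to len(tail) and breaks early)
def pvScanOff : List Char → Nat
  | [] => 0
  | c :: rest => if c = '+' ∨ c = '-' ∨ c = '*' ∨ c = '/' then 0 else pvScanOff rest + 1

def get_succeeding_factor_alt (s : String) (idx : Int) (open_to_close : List (Int × Int)) : Int × String :=
  match PySem.Str.pyGet? s (idx + 2) with
  | none => (0, "")  -- Python raises IndexError here; excluded by Pre_
  | some c =>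
    if c = '(' then
      match PySem.Dict.get? (PySem.Dict.mk open_to_close) (idx + 2) with
      | none => (0, "")  -- Python raises KeyError here; excluded by Pre_
      | some end_idx => (end_idx + 1, PySem.Str.slice s (some (idx + 2)) (some (end_idx + 1)))
    else
      let tail := PySem.Str.slice s (some (idx + 2)) none
      let offset := pvScanOff tail.toList
      let end_idx := PySem.Str.len s - PySem.Str.len tail + (offset : Int)
      (end_idx, PySem.Str.slice tail none (some (offset : Int)))

-- ===== PRECONDITION & SPEC =====
-- Pre_ excludes exactly the inputs where the Python A raises: idx+2 outside the index
-- range of s (IndexError) and s[idx+2] == '(' with idx+2 missing from open_to_close (KeyError).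
def Pre_get_succeeding_factor (s : String) (idx : Int) (open_to_close : List (Int × Int)) : Prop :=
  PySem.Raise.InRange s.toList.length (idx + 2) ∧
  (PySem.Str.pyGet? s (idx + 2) = some '(' →
    ((PySem.Dict.mk open_to_close).get? (idx + 2)).isSome = true)
instance (s : String) (idx : Int) (open_to_close : List (Int × Int)) : Decidable (Pre_get_succeeding_factor s idx open_to_close) := by unfold Pre_get_succeeding_factor; infer_instance

def pvWitness_get_succeeding_factor : String × Int × (List (Int × Int)) := ("a^(b)", 0, [(2, 4)])

def Spec_get_succeeding_factor (s : String) (idx : Int) (open_to_close : List (Int × Int)) (out : Int × String) : Prop := out = get_succeeding_factor_alt s idx open_to_close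
instance (s : String) (idx : Int) (open_to_close : List (Int × Int)) (out : Int × String) : Decidable (Spec_get_succeeding_factor s idx open_to_close out) := by unfold Spec_get_succeeding_factor; infer_instance

-- ===== CLAIM (what is proved, stated in full; the proofs are below) =====
def Claim_equal_get_succeeding_factor : Prop := ∀ (s : String) (idx : Int) (open_to_close : List (Int × Int)), Dom_get_succeeding_factor s idx open_to_close → Pre_get_succeeding_factor s idx open_to_close → Spec_get_succeeding_factor s idx open_to_close (get_succeeding_factor s idx open_to_close)

-- ===== LEMMAS AND PROOFS =====

theorem pv_go_lb (sub t : List Char) (k : Nat) :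
    PySem.Chars.find.go sub t k = -1 ∨ (k : Int) ≤ PySem.Chars.find.go sub t k := by
  induction t generalizing k with
  | nil =>
    simp only [PySem.Chars.find.go]
    cases h : sub.isEmpty <;> simp
  | cons x rest ih =>
    simp only [PySem.Chars.find.go]
    by_cases hp : sub.isPrefixOf (x :: rest) = true
    · simp [hp]
    · simp only [hp]
      rcases ih (k + 1) with h | h
      · exact Or.inl h
      · right; omega

theorem pv_go_shift (sub t : List Char) (k : Nat) :
    PySem.Chars.find.go sub t k =
      if PySem.Chars.find.go sub t 0 = -1 then -1 else k + PySem.Chars.find.go sub t 0 := by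
  induction t generalizing k with
  | nil =>
    simp only [PySem.Chars.find.go]
    cases h : sub.isEmpty <;> simp
  | cons x rest ih =>
    simp only [PySem.Chars.find.go]
    by_cases hp : sub.isPrefixOf (x :: rest) = true
    · simp [hp]
    · simp only [hp]
      rw [ih (k + 1), ih 1]
      rcases pv_go_lb sub rest 0 with h | h <;> split_ifs <;> omega

theorem pv_find_cons_self (c : Char) (rest : List Char) :
    PySem.Chars.find (c :: rest) [c] = 0 := by
  simp [PySem.Chars.find, PySem.Chars.find.go, List.isPrefixOf]

theorem pv_find_cons_of_ne (x c : Char) (rest : List Char) (h : x ≠ c) :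
    PySem.Chars.find (x :: rest) [c] =
      if PySem.Chars.find rest [c] = -1 then -1 else 1 + PySem.Chars.find rest [c] := by
  have hp : ([c].isPrefixOf (x :: rest)) = false := by
    simp [List.isPrefixOf]; exact fun hcx => absurd hcx.symm h
  simp only [PySem.Chars.find, PySem.Chars.find.go, hp]
  exact pv_go_shift [c] rest 1

def pvEff (n : Nat) (t : Int) : Nat := if 0 ≤ t then t.toNat else (t + n).toNat

def pvStep (j n v : Int) : Int :=
  let oi := if v = -1 then -1 else j + v
  if oi < 0 then n else if oi < n then oi else n

theorem pv_find_neg_or_nonneg (d sub : List Char) :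
    PySem.Chars.find d sub = -1 ∨ 0 ≤ PySem.Chars.find d sub := by
  rcases pv_go_lb sub d 0 with h | h
  · exact Or.inl h
  · exact Or.inr h

theorem pv_step_shift (j n f : Int) (hf : f = -1 ∨ 0 ≤ f) :
    pvStep j n (if f = -1 then -1 else 1 + f) = pvStep (j + 1) n f := by
  unfold pvStep
  rcases hf with h | h <;> simp [h] <;> split_ifs <;> omega

theorem pv_step_zero (j n : Int) (hj : 0 ≤ j) (hn : j ≤ n) : pvStep j n 0 = j := by
  simp only [pvStep]; norm_num; split_ifs <;> omega

theorem pv_step_fix (j f : Int) (hf : f = -1 ∨ 0 ≤ f) : pvStep (j + 1) j f = j := by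
  simp only [pvStep]; rcases hf with h | h <;> split_ifs <;> omega

theorem pv_step_ge (j n f : Int) (hf : f = -1 ∨ 0 ≤ f) (hn : j ≤ n) :
    j ≤ pvStep (j + 1) n f := by
  simp only [pvStep]; rcases hf with h | h <;> split_ifs <;> omega

-- A's four-find fold over the tail d, started at absolute position j, equals j + B's scan
theorem pv_quad (d : List Char) (j : Int) (hj : 0 ≤ j) :
    pvStep j (pvStep j (pvStep j (pvStep j (j + d.length) (PySem.Chars.find d ['+']))
      (PySem.Chars.find d ['-'])) (PySem.Chars.find d ['*'])) (PySem.Chars.find d ['/'])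
      = j + (pvScanOff d : Int) := by
  induction d generalizing j with
  | nil =>
    simp [PySem.Chars.find, PySem.Chars.find.go, pvStep, pvScanOff]
  | cons x rest ih =>
    have ha := pv_find_neg_or_nonneg rest ['+']
    have hb := pv_find_neg_or_nonneg rest ['-']
    have hc := pv_find_neg_or_nonneg rest ['*']
    have hd := pv_find_neg_or_nonneg rest ['/']
    by_cases hx : x = '+' ∨ x = '-' ∨ x = '*' ∨ x = '/'
    · have hsc : (pvScanOff (x :: rest) : Int) = 0 := by simp [pvScanOff, hx]
      rw [hsc, add_zero]
      have hn0 : j ≤ j + ((x :: rest).length : Int) := by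
        have : (0 : Int) ≤ ((x :: rest).length : Int) := by positivity
        omega
      rcases hx with h | h | h | h <;> subst h
      · rw [pv_find_cons_self,
            pv_find_cons_of_ne '+' '-' rest (by decide),
            pv_find_cons_of_ne '+' '*' rest (by decide),
            pv_find_cons_of_ne '+' '/' rest (by decide),
            pv_step_shift _ _ _ hb, pv_step_shift _ _ _ hc, pv_step_shift _ _ _ hd,
            pv_step_zero j _ hj hn0,
            pv_step_fix j _ hb, pv_step_fix j _ hc, pv_step_fix j _ hd]
      · rw [pv_find_cons_self,
            pv_find_cons_of_ne '-' '+' rest (by decide),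
            pv_find_cons_of_ne '-' '*' rest (by decide),
            pv_find_cons_of_ne '-' '/' rest (by decide),
            pv_step_shift _ _ _ ha, pv_step_shift _ _ _ hc, pv_step_shift _ _ _ hd,
            pv_step_zero j _ hj (pv_step_ge j _ _ ha hn0),
            pv_step_fix j _ hc, pv_step_fix j _ hd]
      · rw [pv_find_cons_self,
            pv_find_cons_of_ne '*' '+' rest (by decide),
            pv_find_cons_of_ne '*' '-' rest (by decide),
            pv_find_cons_of_ne '*' '/' rest (by decide),
            pv_step_shift _ _ _ ha, pv_step_shift _ _ _ hb, pv_step_shift _ _ _ hd,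
            pv_step_zero j _ hj (pv_step_ge j _ _ hb (pv_step_ge j _ _ ha hn0)),
            pv_step_fix j _ hd]
      · rw [pv_find_cons_self,
            pv_find_cons_of_ne '/' '+' rest (by decide),
            pv_find_cons_of_ne '/' '-' rest (by decide),
            pv_find_cons_of_ne '/' '*' rest (by decide),
            pv_step_shift _ _ _ ha, pv_step_shift _ _ _ hb, pv_step_shift _ _ _ hc,
            pv_step_zero j _ hj (pv_step_ge j _ _ hc (pv_step_ge j _ _ hb (pv_step_ge j _ _ ha hn0)))]
    · push_neg at hx
      obtain ⟨h1, h2, h3, h4⟩ := hx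
      rw [pv_find_cons_of_ne _ _ _ h1, pv_find_cons_of_ne _ _ _ h2,
          pv_find_cons_of_ne _ _ _ h3, pv_find_cons_of_ne _ _ _ h4,
          pv_step_shift _ _ _ ha, pv_step_shift _ _ _ hb,
          pv_step_shift _ _ _ hc, pv_step_shift _ _ _ hd]
      have hlen : j + ((x :: rest).length : Int) = (j + 1) + (rest.length : Int) := by
        simp [List.length_cons]; omega
      rw [hlen, ih (j + 1) (by omega)]
      have hs : pvScanOff (x :: rest) = pvScanOff rest + 1 := by
        simp [pvScanOff, h1, h2, h3, h4]
      rw [hs]; push_cast; ring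

theorem pv_findFrom_eff (s sub : List Char) (t : Int)
    (hlo : -(s.length : Int) ≤ t) (hhi : t < s.length) :
    PySem.Chars.findFrom s sub t none =
      if PySem.Chars.find (s.drop (pvEff s.length t)) sub = -1 then -1
      else (pvEff s.length t : Int) + PySem.Chars.find (s.drop (pvEff s.length t)) sub := by
  by_cases ht : 0 ≤ t
  · have hk : t.toNat ≤ s.length := by omega
    have h := PySem.Chars.findFrom_natCast s sub t.toNat hk
    rw [show ((t.toNat : Nat) : Int) = t from Int.toNat_of_nonneg ht] at h
    rw [h]
    simp [pvEff, ht]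
  · push_neg at ht
    have hst : (0 : Int) ≤ t + s.length := by omega
    have h2 : ¬ (t + (s.length : Int) < 0) := by omega
    have h3 : ¬ ((s.length : Int) < t + s.length) := by omega
    simp only [PySem.Chars.findFrom]
    rw [if_pos ht, if_neg h2, if_neg h3]
    simp only [Int.toNat_natCast, List.take_length]
    simp only [pvEff, if_neg (by omega : ¬ (0 : Int) ≤ t)]
    rw [show ((t + (s.length : Int)).toNat : Int) = t + s.length from Int.toNat_of_nonneg hst]

theorem pv_scanOff_le (d : List Char) : pvScanOff d ≤ d.length := by
  induction d with
  | nil => simp [pvScanOff]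
  | cons x rest ih => simp only [pvScanOff, List.length_cons]; split_ifs <;> omega

theorem pv_clamp_eff (n : Nat) (t : Int) (hlo : -(n : Int) ≤ t) (hhi : t < n) :
    PySem.List.clampIdx n t = pvEff n t := by
  unfold PySem.List.clampIdx pvEff
  split_ifs <;> omega

-- ===== VERDICT (by name: the statement is the Claim_ definition above) =====
set_option maxHeartbeats 1000000 in
theorem get_succeeding_factor_spec : Claim_equal_get_succeeding_factor := by
  intro s idx otc _hD hP
  obtain ⟨hIR, hK⟩ := hP
  obtain ⟨hlo, hhi⟩ := hIR
  unfold Spec_get_succeeding_factor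
  cases hg : PySem.Str.pyGet? s (idx + 2) with
  | none =>
    exfalso
    have hnone : PySem.List.pyGet? s.toList (idx + 2) = none := by
      simpa [PySem.Str.pyGet?, PySem.Chars.pyGet?] using hg
    rw [PySem.List.pyGet?_eq_none_iff] at hnone
    exact hnone ⟨hlo, hhi⟩
  | some c =>
    by_cases hcp : c = '('
    · simp only [get_succeeding_factor, get_succeeding_factor_alt, hg, hcp, if_pos]
    · simp only [get_succeeding_factor, get_succeeding_factor_alt, hg, if_neg hcp]
      set j : Nat := pvEff s.toList.length (idx + 2) with hj
      have hjle : j ≤ s.toList.length := by rw [hj]; unfold pvEff; split_ifs <;> omega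
      have hclamp : PySem.List.clampIdx s.toList.length (idx + 2) = j :=
        pv_clamp_eff _ _ hlo hhi
      -- the tail of B is the drop at the effective start
      have htail : (PySem.Str.slice s (some (idx + 2)) none).toList = s.toList.drop j := by
        simp only [PySem.Str.slice, PySem.Chars.slice, String.toList_ofList]
        rw [PySem.List.slice_some_none, hclamp]
      set d : List Char := s.toList.drop j with hdd
      set off : Nat := pvScanOff d with hoff
      have hoffle : off ≤ d.length := pv_scanOff_le d
      have hdlen : d.length = s.toList.length - j := by rw [hdd, List.length_drop]
      clear_value j d off
      -- A's fold over the four finds equals j + off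
      have hlen : PySem.Str.len s = (s.toList.length : Int) := by
        simp [PySem.Str.len_eq]
      have hff : ∀ op : String, PySem.Str.findFrom s op (idx + 2) none =
          if PySem.Chars.find d op.toList = -1 then -1
          else (j : Int) + PySem.Chars.find d op.toList := by
        intro op
        rw [PySem.Str.findFrom_eq, pv_findFrom_eff s.toList op.toList (idx + 2) hlo hhi,
          ← hj, ← hdd]
      have hslen : (s.toList.length : Int) = (j : Int) + (d.length : Int) := by
        rw [hdlen]; omega
      have hq := pv_quad d (j : Int) (Int.natCast_nonneg j)
      simp only [pvStep] at hq
      have hfold : (["+", "-", "*", "/"].foldl (fun next_operator op =>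
          let op_idx := PySem.Str.findFrom s op (idx + 2) none
          if op_idx < 0 then next_operator
          else if op_idx < next_operator then op_idx else next_operator) (PySem.Str.len s))
          = (j : Int) + (off : Int) := by
        simp only [List.foldl, hff]
        rw [hlen, hslen]
        simp only [show ("+" : String).toList = ['+'] by decide,
          show ("-" : String).toList = ['-'] by decide,
          show ("*" : String).toList = ['*'] by decide,
          show ("/" : String).toList = ['/'] by decide]
        rw [hq, hoff]
      clear hq
      rw [hfold]
      -- the two components agree
      have hints : PySem.Str.len s - PySem.Str.len (PySem.Str.slice s (some (idx + 2)) none)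
          + ((pvScanOff (PySem.Str.slice s (some (idx + 2)) none).toList : Nat) : Int)
          = (j : Int) + (off : Int) := by
        simp only [PySem.Str.len_eq, htail, ← hoff]
        omega
      have hc2 : PySem.List.clampIdx s.toList.length ((j : Int) + (off : Int)) = j + off := by
        unfold PySem.List.clampIdx
        split_ifs <;> omega
      have hstr : PySem.Str.slice s (some (idx + 2)) (some ((j : Int) + (off : Int)))
          = PySem.Str.slice (PySem.Str.slice s (some (idx + 2)) none) none
              (some ((pvScanOff (PySem.Str.slice s (some (idx + 2)) none).toList : Nat) : Int)) := by
        have hlhs : PySem.Chars.slice s.toList (some (idx + 2)) (some ((j : Int) + (off : Int)))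
            = d.take off := by
          simp only [PySem.Chars.slice, PySem.List.slice, hclamp, hc2]
          rw [show j + off - j = off from by omega, ← hdd]
        have hrhs : PySem.Chars.slice d none (some ((off : Nat) : Int)) = d.take off := by
          simp only [PySem.Chars.slice]
          rw [PySem.List.slice_to_natCast]
        have htail2 : PySem.Chars.slice s.toList (some (idx + 2)) none = d := by
          have := htail
          simpa only [PySem.Str.slice, String.toList_ofList] using this
        simp only [PySem.Str.slice, String.toList_ofList, htail2, ← hoff]
        rw [hlhs, hrhs]
      rw [hstr, ← hints]
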